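-- pv_equiv track=rewrite | github.com/pypi-data/pypi-mirror-386 | packages/bitbucket-code-reviewer/bitbucket_code_reviewer-0.2.9-py3-none-any.whl/bitbucket_code_reviewer/reviewer/review_orchestrator.py | _sanitize_llm_json_string
-- ===== SOURCE A (Python) =====
-- def _sanitize_llm_json_string(raw: str) -> str:
--     """Best-effort repair of common JSON issues from LLM output.
--
--     - Strip markdown code blocks (```json ... ```)
--     - Replace invalid escapes (e.g., \\' -> ')
--     - Replace literal newlines in strings with \n
--     This keeps valid JSON escapes intact and only tweaks problematic cases.
--     """
--     # Strip markdown code blocks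
--     cleaned = raw.strip()
--     if cleaned.startswith("```"):
--         # Find the first newline after the opening ```
--         first_newline = cleaned.find("\n")
--         if first_newline != -1:
--             cleaned = cleaned[first_newline + 1 :]
--         # Remove trailing ```
--         if cleaned.endswith("```"):
--             cleaned = cleaned[: -3].rstrip()
--
--     result_chars: list[str] = []
--     inside_string = False
--     pending_escape = False
--
--     for ch in cleaned:
--         if inside_string:
--             if pending_escape:
--                 # Preserve only valid JSON escapes
--                 if ch in '"\\/bfnrt':
--                     result_chars.append("\\" + ch)
--                 elif ch == "u":
--                     # Keep unicode escape prefix; assume following digits are fine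
--                     result_chars.append("\\u")
--                 elif ch == "'":
--                     # Invalid JSON escape (\'): drop the backslash
--                     result_chars.append("'")
--                 else:
--                     # Unknown escape like \), \(, etc. Drop backslash, keep char
--                     result_chars.append(ch)
--                 pending_escape = False
--             else:
--                 if ch == "\\":
--                     pending_escape = True
--                 elif ch == '"':
--                     inside_string = False
--                     result_chars.append(ch)
--                 elif ch == "\n":
--                     result_chars.append("\\n")
--                 elif ch == "\r":
--                     result_chars.append("\\r")
--                 else:
--                     result_chars.append(ch)
--         else:
--             if ch == '"':
--                 inside_string = True
--             result_chars.append(ch)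
--
--     # If string ended with a dangling backslash, keep it as-is
--     return "".join(result_chars)
-- ===== SOURCE B (Python) =====
-- def _escape_repl(d: str) -> str:
--     """Replacement text for the escape pair backslash+d."""
--     if d in '"\\/bfnrt':
--         return "\\" + d
--     if d == "u":
--         return "\\u"
--     # \' and any unknown escape: drop the backslash, keep the char
--     return d
--
--
-- def _sanitize_llm_json_string(raw: str) -> str:
--     """Segment-based repair: bulk-copy text between quotes, and inside a string
--     jump from one backslash/quote to the next with find(), fixing newlines in
--     each chunk with str.replace. No per-character state machine."""
--     cleaned = raw.strip()
--     if cleaned.startswith("```"):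
--         first_newline = cleaned.find("\n")
--         if first_newline != -1:
--             cleaned = cleaned[first_newline + 1:]
--         if cleaned.endswith("```"):
--             cleaned = cleaned[:-3].rstrip()
--
--     out = []
--     rest = cleaned
--     while True:
--         # outside a string: everything up to the next quote is copied verbatim
--         before, sep, rest = rest.partition('"')
--         out.append(before)
--         out.append(sep)
--         if not sep:
--             break
--         # inside a string: hop to the next backslash or quote
--         while True:
--             kb = rest.find("\\")
--             kq = rest.find('"')
--             if kb != -1 and (kq == -1 or kb < kq):
--                 out.append(rest[:kb].replace("\n", "\\n").replace("\r", "\\r"))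
--                 if kb + 1 == len(rest):
--                     rest = ""  # dangling backslash at end: dropped
--                     break
--                 out.append(_escape_repl(rest[kb + 1]))
--                 rest = rest[kb + 2:]
--             elif kq != -1:
--                 out.append(rest[:kq].replace("\n", "\\n").replace("\r", "\\r"))
--                 out.append('"')
--                 rest = rest[kq + 1:]
--                 break
--             else:
--                 out.append(rest.replace("\n", "\\n").replace("\r", "\\r"))
--                 rest = ""
--                 break
--     return "".join(out)
-- ===== Notes on version B (the rewrite author's own statement) =====
-- stated objective: faster
-- what changed: Replaced A's per-character state machine (fold threading inside_string/pending_escape flags over every char) with segment-based scanning: partition/find jump straight to the next quote or backslash, the chunks in between are copied in bulk (str.replace fixing newlines inside strings), and only escape pairs are handled individually.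
import Mathlib
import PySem

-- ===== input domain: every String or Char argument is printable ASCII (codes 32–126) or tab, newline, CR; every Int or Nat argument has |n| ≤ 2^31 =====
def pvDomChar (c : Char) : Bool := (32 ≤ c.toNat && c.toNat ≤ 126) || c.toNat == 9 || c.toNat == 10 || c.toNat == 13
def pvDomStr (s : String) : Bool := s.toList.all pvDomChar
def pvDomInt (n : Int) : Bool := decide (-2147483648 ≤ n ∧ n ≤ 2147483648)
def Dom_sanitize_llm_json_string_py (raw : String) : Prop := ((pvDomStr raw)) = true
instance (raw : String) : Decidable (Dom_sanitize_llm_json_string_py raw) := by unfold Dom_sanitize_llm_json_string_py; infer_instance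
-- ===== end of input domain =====

-- B replaces A's per-character state machine by segment-based scanning (partition/find hop to the
-- next quote or backslash, bulk copy of the chunks in between); same values, measured faster in a timing run.

-- shared helper: the markdown-fence stripping prefix, identical in A's and B's Python
def pvStripFences (s : List Char) : List Char :=
  let cleaned := PySem.Chars.strip s
  if PySem.Chars.startswith cleaned "```".toList then
    let fn := PySem.Chars.find cleaned "\n".toList
    let cleaned := if fn ≠ -1 then PySem.Chars.slice cleaned (some (fn + 1)) none else cleaned
    if PySem.Chars.endswith cleaned "```".toList then
      PySem.Chars.rstrip (PySem.Chars.slice cleaned none (some (-3)))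
    else cleaned
  else cleaned

-- ===== PORT A =====
-- A's loop: fold over the characters with state (result_chars, inside_string, pending_escape)
def pvAStep (st : List Char × Bool × Bool) (ch : Char) : List Char × Bool × Bool :=
  match st with
  | (acc, true, true) =>
      if ['"', '\\', '/', 'b', 'f', 'n', 'r', 't'].contains ch then (acc ++ ['\\', ch], true, false)
      else if ch = 'u' then (acc ++ ['\\', 'u'], true, false)
      else if ch = '\'' then (acc ++ ['\''], true, false)
      else (acc ++ [ch], true, false)
  | (acc, true, false) =>
      if ch = '\\' then (acc, true, true)
      else if ch = '"' then (acc ++ [ch], false, false)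
      else if ch = '\n' then (acc ++ ['\\', 'n'], true, false)
      else if ch = '\r' then (acc ++ ['\\', 'r'], true, false)
      else (acc ++ [ch], true, false)
  | (acc, false, _) =>
      (acc ++ [ch], ch == '"', false)

def sanitize_llm_json_string_py (raw : String) : String :=
  let cleaned := pvStripFences raw.toList
  String.ofList (cleaned.foldl pvAStep ([], false, false)).1

-- ===== PORT B =====
-- Source B's _escape_repl: replacement text for the escape pair backslash+d
def pvEsc (d : Char) : List Char :=
  if ['"', '\\', '/', 'b', 'f', 'n', 'r', 't'].contains d then ['\\', d]
  else if d = 'u' then ['\\', 'u']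
  else [d]

-- Source B's chunk fix: rest[:k].replace("\n","\\n").replace("\r","\\r"); on a chunk containing no
-- backslash/quote the two chained replaces equal this single character-wise expansion (exact)
def pvChunkFix (l : List Char) : List Char :=
  l.flatMap (fun c => if c = '\n' then ['\\', 'n'] else if c = '\r' then ['\\', 'r'] else [c])

-- Source B's two nested while loops: pvOut = the outer partition('"') loop (outside a string),
-- pvIn = the inner hop to the next backslash or quote (inside a string). Source B's find/partition
-- split "text before the first stop character / the rest" is takeWhile/dropWhile here (exact).
mutual
def pvOut (l : List Char) : List Char :=
  match h : l.dropWhile (· != '"') with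
  | [] => l.takeWhile (· != '"')
  | _ :: rest => l.takeWhile (· != '"') ++ '"' :: pvIn rest
termination_by l.length
decreasing_by
  have h1 : (l.dropWhile (· != '"')).length ≤ l.length := (List.dropWhile_sublist _).length_le
  rw [h] at h1; simp at h1; omega

def pvIn (l : List Char) : List Char :=
  match h : l.dropWhile (fun c => !(c == '\\' || c == '"')) with
  | [] => pvChunkFix (l.takeWhile (fun c => !(c == '\\' || c == '"')))
  | c :: rest =>
    if c = '\\' then
      match rest with
      | [] => pvChunkFix (l.takeWhile (fun c => !(c == '\\' || c == '"')))
      | d :: rest' =>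
          pvChunkFix (l.takeWhile (fun c => !(c == '\\' || c == '"'))) ++ pvEsc d ++ pvIn rest'
    else pvChunkFix (l.takeWhile (fun c => !(c == '\\' || c == '"'))) ++ '"' :: pvOut rest
termination_by l.length
decreasing_by
  all_goals
    have h1 : (l.dropWhile (fun c => !(c == '\\' || c == '"'))).length ≤ l.length :=
      (List.dropWhile_sublist _).length_le
  · rw [h] at h1; simp at h1; omega
  · rw [h] at h1; simp at h1; omega
end

def sanitize_llm_json_string_py_alt (raw : String) : String :=
  String.ofList (pvOut (pvStripFences raw.toList))

-- ===== PRECONDITION & SPEC =====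
def Spec_sanitize_llm_json_string_py (raw : String) (out : String) : Prop := out = sanitize_llm_json_string_py_alt raw
instance (raw : String) (out : String) : Decidable (Spec_sanitize_llm_json_string_py raw out) := by unfold Spec_sanitize_llm_json_string_py; infer_instance

-- ===== CLAIM (what is proved, stated in full; the proofs are below) =====
def Claim_equal_sanitize_llm_json_string_py : Prop := ∀ (raw : String), Dom_sanitize_llm_json_string_py raw → Spec_sanitize_llm_json_string_py raw (sanitize_llm_json_string_py raw)

-- ===== LEMMAS AND PROOFS =====

-- proof-only bridge: the char-wise reading of the sanitiser (boolean = inside_string)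
def pvGo : List Char → Bool → List Char
  | [], _ => []
  | c :: rest, false => c :: pvGo rest (c == '"')
  | c :: rest, true =>
    if c = '\\' then
      match rest with
      | [] => []
      | d :: rest' => pvEsc d ++ pvGo rest' true
    else if c = '"' then c :: pvGo rest false
    else if c = '\n' then '\\' :: 'n' :: pvGo rest true
    else if c = '\r' then '\\' :: 'r' :: pvGo rest true
    else c :: pvGo rest true

-- A's fold computes pvGo (invariant over the three reachable states)
theorem pvFold_eq_go (l : List Char) :
    (∀ (acc : List Char) (inside : Bool),
        (List.foldl pvAStep (acc, inside, false) l).1 = acc ++ pvGo l inside) ∧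
    (∀ (acc : List Char),
        (List.foldl pvAStep (acc, true, true) l).1 = acc ++ pvGo ('\\' :: l) true) := by
  induction l with
  | nil => simp [pvGo]
  | cons c rest ih =>
    refine ⟨?_, ?_⟩
    · intro acc inside
      cases inside with
      | false =>
        rw [List.foldl_cons, show pvAStep (acc, false, false) c = (acc ++ [c], c == '"', false) from rfl,
            ih.1]
        simp [pvGo]
      | true =>
        by_cases hb : c = '\\'
        · subst hb
          rw [List.foldl_cons, show pvAStep (acc, true, false) '\\' = (acc, true, true) from rfl, ih.2]
        · have hstep : pvAStep (acc, true, false) c =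
              (if c = '\\' then (acc, true, true)
               else if c = '"' then (acc ++ [c], false, false)
               else if c = '\n' then (acc ++ ['\\', 'n'], true, false)
               else if c = '\r' then (acc ++ ['\\', 'r'], true, false)
               else (acc ++ [c], true, false)) := rfl
          have hgo : pvGo (c :: rest) true =
              (if c = '"' then c :: pvGo rest false
               else if c = '\n' then '\\' :: 'n' :: pvGo rest true
               else if c = '\r' then '\\' :: 'r' :: pvGo rest true
               else c :: pvGo rest true) := by
            conv_lhs => rw [pvGo.eq_def]
            simp [hb]
          rw [List.foldl_cons, hstep, if_neg hb, hgo]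
          split_ifs <;> rw [ih.1] <;> simp
    · intro acc
      have hgo : pvGo ('\\' :: c :: rest) true = pvEsc c ++ pvGo rest true := by
        conv_lhs => rw [pvGo.eq_def]
        simp
      have hstep : pvAStep (acc, true, true) c =
          (if ['"', '\\', '/', 'b', 'f', 'n', 'r', 't'].contains c then (acc ++ ['\\', c], true, false)
           else if c = 'u' then (acc ++ ['\\', 'u'], true, false)
           else if c = '\'' then (acc ++ ['\''], true, false)
           else (acc ++ [c], true, false)) := rfl
      rw [List.foldl_cons, hstep]
      by_cases h1 : ['"', '\\', '/', 'b', 'f', 'n', 'r', 't'].contains c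
      · rw [if_pos h1, ih.1, hgo]
        unfold pvEsc; rw [if_pos h1]; simp
      · rw [if_neg h1]
        by_cases h2 : c = 'u'
        · rw [if_pos h2, ih.1, hgo]; subst h2
          unfold pvEsc; rw [if_neg h1, if_pos rfl]; simp
        · rw [if_neg h2]
          by_cases h3 : c = '\''
          · rw [if_pos h3, ih.1, hgo]; subst h3
            unfold pvEsc; rw [if_neg h1, if_neg h2]; simp
          · rw [if_neg h3, ih.1, hgo]
            unfold pvEsc; rw [if_neg h1, if_neg h2]; simp

-- pvGo passes over a chunk containing no quote (outside a string): verbatim copy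
theorem pvGo_chunk_out (chunk rest : List Char)
    (hc : ∀ c ∈ chunk, (c != '"') = true) :
    pvGo (chunk ++ rest) false = chunk ++ pvGo rest false := by
  induction chunk with
  | nil => simp
  | cons a t ih =>
    have ha : (a == '"') = false := by
      have := hc a (by simp)
      simpa using this
    simp only [List.cons_append, pvGo, ha]
    rw [ih (fun c hc' => hc c (by simp [hc']))]

-- pvGo passes over a chunk containing no backslash/quote (inside a string): pvChunkFix copy
theorem pvGo_chunk_in (chunk rest : List Char)
    (hc : ∀ c ∈ chunk, (!(c == '\\' || c == '"')) = true) :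
    pvGo (chunk ++ rest) true = pvChunkFix chunk ++ pvGo rest true := by
  induction chunk with
  | nil => simp [pvChunkFix]
  | cons a t ih =>
    have ha := hc a (by simp)
    have hb : ¬ a = '\\' := by simpa using fun h => by simp [h] at ha
    have hq : ¬ a = '"' := by
      intro h; simp [h] at ha
    have hrec := ih (fun c hc' => hc c (by simp [hc']))
    simp only [List.cons_append]
    rw [pvGo.eq_def]
    simp only [if_neg hb, if_neg hq]
    by_cases hn : a = '\n'
    · subst hn; simp [hrec, pvChunkFix]
    · by_cases hr : a = '\r'
      · subst hr; simp [hn, hrec, pvChunkFix]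
      · simp [hn, hr, hrec, pvChunkFix]

-- head of dropWhile fails the predicate
theorem pvDropWhile_head {α : Type} (p : α → Bool) (l : List α) (c : α) (rest : List α)
    (h : l.dropWhile p = c :: rest) : p c = false := by
  induction l with
  | nil => simp at h
  | cons a t ih =>
    rw [List.dropWhile_cons] at h
    by_cases pa : p a = true
    · exact ih (by simpa [pa] using h)
    · have : a = c := by
        simp [pa] at h
        exact h.1
      subst this
      simpa using pa

-- B's segment loops compute pvGo
theorem pvOutIn_eq_go : ∀ (n : Nat) (l : List Char), l.length ≤ n →
    pvOut l = pvGo l false ∧ pvIn l = pvGo l true := by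
  intro n
  induction n with
  | zero =>
    intro l hl
    have : l = [] := List.length_eq_zero_iff.mp (Nat.le_antisymm hl (Nat.zero_le _))
    subst this
    constructor
    · rw [pvOut]; simp [pvGo]
    · rw [pvIn]; simp [pvGo, pvChunkFix]
  | succ n ih =>
    intro l hl
    constructor
    · rw [pvOut]
      split
      · rename_i h
        have htw : l.takeWhile (· != '"') = l := by
          have := List.takeWhile_append_dropWhile (p := (· != '"')) (l := l)
          rw [h] at this; simpa using this
        have hall : ∀ c ∈ l, (c != '"') = true := by
          intro c hc
          have hc' : c ∈ l.takeWhile (· != '"') := by rw [htw]; exact hc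
          exact List.mem_takeWhile_imp (p := (· != '"')) hc'
        calc l.takeWhile (· != '"') = l ++ pvGo [] false := by rw [htw]; simp [pvGo]
          _ = pvGo (l ++ []) false := (pvGo_chunk_out l [] hall).symm
          _ = pvGo l false := by simp
      · rename_i c rest h
        have hdecomp : l.takeWhile (· != '"') ++ c :: rest = l := by
          have := List.takeWhile_append_dropWhile (p := (· != '"')) (l := l)
          rw [h] at this; exact this
        have hall : ∀ x ∈ l.takeWhile (· != '"'), (x != '"') = true :=
          fun x hx => List.mem_takeWhile_imp (p := (· != '"')) hx
        have hcq : c = '"' := by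
          have := pvDropWhile_head _ l c rest h
          simpa using this
        have hlen : rest.length ≤ n := by
          have := congrArg List.length hdecomp
          simp at this
          omega
        subst hcq
        conv_rhs => rw [← hdecomp]
        rw [pvGo_chunk_out _ _ hall]
        rw [show pvGo ('"' :: rest) false = '"' :: pvGo rest true from by simp [pvGo]]
        rw [(ih rest hlen).2]
    · rw [pvIn]
      split
      · rename_i h
        have htw : l.takeWhile (fun c => !(c == '\\' || c == '"')) = l := by
          have := List.takeWhile_append_dropWhile (p := (fun c => !(c == '\\' || c == '"'))) (l := l)
          rw [h] at this; simpa using this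
        have hall : ∀ c ∈ l, (!(c == '\\' || c == '"')) = true := by
          intro c hc
          have hc' : c ∈ l.takeWhile (fun c => !(c == '\\' || c == '"')) := by rw [htw]; exact hc
          exact List.mem_takeWhile_imp (p := (fun c => !(c == '\\' || c == '"'))) hc'
        calc pvChunkFix (l.takeWhile (fun c => !(c == '\\' || c == '"')))
            = pvChunkFix l ++ pvGo [] true := by rw [htw]; simp [pvGo]
          _ = pvGo (l ++ []) true := (pvGo_chunk_in l [] hall).symm
          _ = pvGo l true := by simp
      · rename_i c rest h
        have hdecomp : l.takeWhile (fun c => !(c == '\\' || c == '"')) ++ c :: rest = l := by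
          have := List.takeWhile_append_dropWhile (p := (fun c => !(c == '\\' || c == '"'))) (l := l)
          rw [h] at this; exact this
        have hall : ∀ x ∈ l.takeWhile (fun c => !(c == '\\' || c == '"')),
            (!(x == '\\' || x == '"')) = true :=
          fun x hx => List.mem_takeWhile_imp (p := (fun c => !(c == '\\' || c == '"'))) hx
        have h2 := pvDropWhile_head _ l c rest h
        have hlen : rest.length ≤ n := by
          have := congrArg List.length hdecomp
          simp at this
          omega
        split
        · rename_i hb
          subst hb
          cases rest with
          | nil =>
            show pvChunkFix (l.takeWhile (fun c => !(c == '\\' || c == '"'))) = pvGo l true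
            conv_rhs => rw [← hdecomp]
            rw [pvGo_chunk_in _ _ hall]
            rw [show pvGo ['\\'] true = [] from by rw [pvGo.eq_def]; simp]
            simp
          | cons d rest' =>
            show pvChunkFix (l.takeWhile (fun c => !(c == '\\' || c == '"'))) ++ pvEsc d ++ pvIn rest' =
              pvGo l true
            have hlen' : rest'.length ≤ n := by simp at hlen; omega
            conv_rhs => rw [← hdecomp]
            rw [pvGo_chunk_in _ _ hall]
            rw [show pvGo ('\\' :: d :: rest') true = pvEsc d ++ pvGo rest' true from by
              rw [pvGo.eq_def]; simp]
            rw [(ih rest' hlen').2]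
            simp
        · rename_i hb
          have hcq : c = '"' := by
            by_contra hq
            simp [hb, hq] at h2
          subst hcq
          conv_rhs => rw [← hdecomp]
          rw [pvGo_chunk_in _ _ hall]
          rw [show pvGo ('"' :: rest) true = '"' :: pvGo rest false from by
            rw [pvGo.eq_def]; simp]
          rw [(ih rest hlen).1]

-- ===== VERDICT (by name: the statement is the Claim_ definition above) =====
theorem sanitize_llm_json_string_py_spec : Claim_equal_sanitize_llm_json_string_py := by
  intro raw _
  show String.ofList (List.foldl pvAStep ([], false, false) (pvStripFences raw.toList)).1 =
      String.ofList (pvOut (pvStripFences raw.toList))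
  rw [(pvFold_eq_go (pvStripFences raw.toList)).1 [] false,
    (pvOutIn_eq_go (pvStripFences raw.toList).length _ le_rfl).1]
  simp
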